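-- pv_equiv track=rewrite | github.com/AlphaZero28/image2txt | imgProcessing.py | bounding_vertical_rect
-- ===== SOURCE A (Python) =====
-- def bounding_vertical_rect(vert_data):
--     ''' returns the initial and final x axis point of each word'''
--     bounding_vertical_rect = []
--     valp = 0
--     pos1 = 0
--     thresh_val = 0
--
--     for i, val in enumerate(vert_data):
--         if val > thresh_val and valp <= thresh_val:
--             pos1 = i-1
--
--         elif (not i == 0) and val <= thresh_val and valp > thresh_val:
--             if (i-pos1) > 2:
--                 bounding_vertical_rect.append((pos1, i+1))
--         valp = val
--
--     return bounding_vertical_rect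
-- ===== SOURCE B (Python) =====
-- def bounding_vertical_rect(vert_data):
--     ''' returns the initial and final x axis point of each word'''
--     out = []
--     n = len(vert_data)
--     i = 0
--     while i < n:
--         p = vert_data[i] > 0
--         j = i
--         while j < n and (vert_data[j] > 0) == p:
--             j += 1
--         # emit a word box only for a positive run of length >= 2 that does not reach the end
--         if p and j < n and j - i >= 2:
--             out.append((i - 1, j + 1))
--         i = j
--     return out
-- ===== Notes on version B (the rewrite author's own statement) =====
-- stated objective: alternative
-- what changed: B replaces A's element-by-element edge-detection state machine (valp/pos1 registers) with a run-length scan: it finds each maximal run of same-signedness values and emits (start-1, end+1) for positive runs of length >= 2 that do not reach the end of the list.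
import Mathlib
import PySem

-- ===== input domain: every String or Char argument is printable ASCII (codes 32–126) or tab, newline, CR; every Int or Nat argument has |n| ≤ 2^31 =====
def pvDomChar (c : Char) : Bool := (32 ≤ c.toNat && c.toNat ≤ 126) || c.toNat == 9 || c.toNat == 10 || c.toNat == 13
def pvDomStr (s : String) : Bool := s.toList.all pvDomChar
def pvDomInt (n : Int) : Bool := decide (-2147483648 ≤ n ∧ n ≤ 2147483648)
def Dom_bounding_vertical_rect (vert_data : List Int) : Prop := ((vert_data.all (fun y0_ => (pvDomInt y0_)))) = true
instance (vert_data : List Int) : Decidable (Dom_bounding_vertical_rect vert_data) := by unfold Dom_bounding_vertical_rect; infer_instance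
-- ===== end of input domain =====

-- B replaces A's edge-detection state machine with a run-length scan over maximal
-- same-signedness runs (objective: alternative decomposition, same O(n) cost).

-- ===== PORT A =====
-- A's loop: index i, previous value valp, recorded rising position pos1, accumulator.
def aGo (i valp pos1 : Int) (acc : List (Int × Int)) : List Int → List (Int × Int)
  | [] => acc
  | v :: rest =>
    if v > 0 ∧ valp ≤ 0 then
      aGo (i + 1) v (i - 1) acc rest
    else if ¬ i = 0 ∧ v ≤ 0 ∧ valp > 0 then
      aGo (i + 1) v pos1 (if i - pos1 > 2 then acc ++ [(pos1, i + 1)] else acc) rest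
    else
      aGo (i + 1) v pos1 acc rest

def bounding_vertical_rect (vert_data : List Int) : List (Int × Int) :=
  aGo 0 0 0 [] vert_data

-- ===== PORT B =====
-- inner while loop of B: length of the maximal leading run whose (v > 0) equals p
def runLen (p : Bool) : List Int → Nat
  | [] => 0
  | v :: rest => if decide (v > 0) = p then runLen p rest + 1 else 0

theorem runLen_cons_pos {p : Bool} {v : Int} {rest : List Int} (h : decide (v > 0) = p) :
    runLen p (v :: rest) = runLen p rest + 1 := by simp [runLen, h]

-- outer while loop of B: at position i with remaining list xs (n = total length)
def altGo (n i : Int) (xs : List Int) : List (Int × Int) :=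
  match xs with
  | [] => []
  | v :: rest =>
    let p := decide (v > 0)
    let l : Nat := runLen p (v :: rest)
    (if p = true ∧ i + (l : Int) < n ∧ 2 ≤ l then [(i - 1, i + (l : Int) + 1)] else [])
      ++ altGo n (i + (l : Int)) (List.drop l (v :: rest))
termination_by xs.length
decreasing_by
  simp only [List.length_drop, List.length_cons]
  have : runLen (decide (v > 0)) (v :: rest) = runLen (decide (v > 0)) rest + 1 :=
    runLen_cons_pos rfl
  omega

def bounding_vertical_rect_alt (vert_data : List Int) : List (Int × Int) :=
  altGo (vert_data.length : Int) 0 vert_data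

-- ===== PRECONDITION & SPEC =====
def Spec_bounding_vertical_rect (vert_data : List Int) (out : List (Int × Int)) : Prop := out = bounding_vertical_rect_alt vert_data
instance (vert_data : List Int) (out : List (Int × Int)) : Decidable (Spec_bounding_vertical_rect vert_data out) := by unfold Spec_bounding_vertical_rect; infer_instance

-- ===== CLAIM (what is proved, stated in full; the proofs are below) =====
def Claim_equal_bounding_vertical_rect : Prop := ∀ (vert_data : List Int), Dom_bounding_vertical_rect vert_data → Spec_bounding_vertical_rect vert_data (bounding_vertical_rect vert_data)

-- ===== LEMMAS AND PROOFS =====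

theorem altGo_cons (n i v : Int) (rest : List Int) :
    altGo n i (v :: rest) =
      (if decide (v > 0) = true ∧ i + (runLen (decide (v > 0)) (v :: rest) : Int) < n ∧
            2 ≤ runLen (decide (v > 0)) (v :: rest) then
          [(i - 1, i + (runLen (decide (v > 0)) (v :: rest) : Int) + 1)] else [])
        ++ altGo n (i + (runLen (decide (v > 0)) (v :: rest) : Int))
            (List.drop (runLen (decide (v > 0)) (v :: rest)) (v :: rest)) := by
  rw [altGo]

theorem runLen_le (p : Bool) : ∀ (xs : List Int), runLen p xs ≤ xs.length := by
  intro xs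
  induction xs with
  | nil => simp [runLen]
  | cons v rest ih => simp only [runLen, List.length_cons]; split_ifs <;> omega

theorem aGo_acc (xs : List Int) : ∀ (i valp pos1 : Int) (acc : List (Int × Int)),
    aGo i valp pos1 acc xs = acc ++ aGo i valp pos1 [] xs := by
  induction xs with
  | nil => intro i valp pos1 acc; simp [aGo]
  | cons v rest ih =>
    intro i valp pos1 acc
    by_cases h1 : v > 0 ∧ valp ≤ 0
    · simp only [aGo, if_pos h1]; exact ih ..
    · by_cases h2 : ¬ i = 0 ∧ v ≤ 0 ∧ valp > 0
      · simp only [aGo, if_neg h1, if_pos h2]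
        by_cases h3 : i - pos1 > 2
        · simp only [if_pos h3]
          rw [ih _ _ _ (acc ++ [(pos1, i + 1)]), ih _ _ _ ([] ++ [(pos1, i + 1)]),
            List.append_assoc]
          simp
        · simp only [if_neg h3]; exact ih ..
      · simp only [aGo, if_neg h1, if_neg h2]; exact ih ..

-- the element just after the maximal positive run is nonpositive
theorem after_run_nonpos : ∀ (xs : List Int),
    runLen true xs < xs.length → xs.getD (runLen true xs) 0 ≤ 0 := by
  intro xs
  induction xs with
  | nil => simp [runLen]
  | cons v rest ih =>
    by_cases hv : v > 0
    · rw [runLen_cons_pos (by simp [hv])]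
      simpa using ih
    · intro _; simpa [runLen, hv] using not_lt.mp hv

-- run lemma: A's loop in "inside a word" state (valp > 0) consumes the remaining
-- positive run, emits at the falling edge, and returns to gap state
theorem aGo_run : ∀ (xs : List Int) (i valp pos1 : Int), 0 < valp → 1 ≤ i →
    aGo i valp pos1 [] xs =
      if runLen true xs < xs.length then
        (if i + (runLen true xs : Int) - pos1 > 2 then
            [(pos1, i + (runLen true xs : Int) + 1)] else [])
          ++ aGo (i + (runLen true xs : Int) + 1) (xs.getD (runLen true xs) 0) pos1 []
              (List.drop (runLen true xs + 1) xs)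
      else [] := by
  intro xs
  induction xs with
  | nil => intro i valp pos1 hv hi; simp [aGo, runLen]
  | cons v rest ih =>
    intro i valp pos1 hv hi
    by_cases hpos : v > 0
    · -- run continues
      have hstep : aGo i valp pos1 [] (v :: rest) = aGo (i + 1) v pos1 [] rest := by
        simp only [aGo]
        rw [if_neg (by rintro ⟨-, h⟩; omega), if_neg (by rintro ⟨-, h, -⟩; omega)]
      rw [hstep, ih (i + 1) v pos1 hpos (by omega),
        runLen_cons_pos (p := true) (v := v) (rest := rest) (by simp [hpos])]
      have hcast : ((runLen true rest + 1 : Nat) : Int) = (runLen true rest : Int) + 1 := by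
        push_cast; ring
      rw [hcast]
      by_cases h : runLen true rest < rest.length
      · rw [if_pos (show runLen true rest + 1 < (v :: rest).length by
            simp only [List.length_cons]; omega), if_pos h]
        have e1 : i + 1 + (runLen true rest : Int) = i + ((runLen true rest : Int) + 1) := by ring
        have e2 : (v :: rest).getD (runLen true rest + 1) 0 = rest.getD (runLen true rest) 0 :=
          rfl
        have e3 : List.drop (runLen true rest + 1 + 1) (v :: rest)
            = List.drop (runLen true rest + 1) rest := rfl
        rw [e1, e2, e3]
      · rw [if_neg (show ¬ runLen true rest + 1 < (v :: rest).length by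
            simp only [List.length_cons]; omega), if_neg h]
    · -- falling edge now (runLen = 0)
      have hl : runLen true (v :: rest) = 0 := by
        simp only [runLen]
        rw [if_neg (by simp; omega)]
      have hstep : aGo i valp pos1 [] (v :: rest)
          = aGo (i + 1) v pos1 (if i - pos1 > 2 then [] ++ [(pos1, i + 1)] else []) rest := by
        simp only [aGo]
        rw [if_neg (by rintro ⟨h, -⟩; omega), if_pos ⟨by omega, by omega, hv⟩]
      rw [hstep, aGo_acc,
        if_pos (show runLen true (v :: rest) < (v :: rest).length by
          simp only [hl, List.length_cons]; omega), hl]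
      simp only [Nat.cast_zero, add_zero]
      have e2 : (v :: rest).getD 0 0 = v := rfl
      have e3 : List.drop (0 + 1) (v :: rest) = rest := rfl
      rw [e2, e3]
      by_cases h3 : i - pos1 > 2
      · rw [if_pos h3, if_pos h3]
        simp
      · rw [if_neg h3, if_neg h3]

-- skipping one nonpositive element is absorbed by B's nonpositive-run grouping
theorem altGo_nonpos_step (n i : Int) (v : Int) (rest : List Int) (hv : v ≤ 0) :
    altGo n i (v :: rest) = altGo n (i + 1) rest := by
  have hp : decide (v > 0) = false := by simp; omega
  rw [altGo_cons, hp]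
  rw [if_neg (by rintro ⟨h, -⟩; simp at h)]
  rw [runLen_cons_pos hp]
  cases rest with
  | nil => simp [runLen, altGo]
  | cons w rest2 =>
    by_cases hw : w > 0
    · have h0 : runLen false (w :: rest2) = 0 := by
        simp only [runLen]
        rw [if_neg (by simp [hw])]
      rw [h0]
      simp
    · have hpw : decide (w > 0) = false := by simp; omega
      rw [altGo_cons n (i + 1) w rest2, hpw]
      rw [if_neg (by rintro ⟨h, -⟩; simp at h)]
      have hc : ((runLen false (w :: rest2) + 1 : Nat) : Int)
          = (runLen false (w :: rest2) : Int) + 1 := by push_cast; ring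
      rw [hc]
      have e1 : i + ((runLen false (w :: rest2) : Int) + 1)
          = i + 1 + (runLen false (w :: rest2) : Int) := by ring
      have e2 : List.drop (runLen false (w :: rest2) + 1) (v :: w :: rest2)
          = List.drop (runLen false (w :: rest2)) (w :: rest2) := by simp
      rw [e1, e2]

-- gap lemma: A's loop in "between words" state equals B's run scan
theorem aGo_gap : ∀ (k : Nat) (xs : List Int), xs.length ≤ k →
    ∀ (i valp pos1 n : Int), valp ≤ 0 → 0 ≤ i → n = i + xs.length →
    aGo i valp pos1 [] xs = altGo n i xs := by
  intro k
  induction k with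
  | zero =>
    intro xs hlen i valp pos1 n _ _ _
    have : xs = [] := List.eq_nil_of_length_eq_zero (Nat.le_zero.mp hlen)
    subst this; simp [aGo, altGo]
  | succ k ih =>
    intro xs hlen i valp pos1 n hvp hi hn
    cases xs with
    | nil => simp [aGo, altGo]
    | cons v rest =>
      by_cases hpos : v > 0
      · -- rising edge: enter run state with pos1 := i - 1
        have hstep : aGo i valp pos1 [] (v :: rest) = aGo (i + 1) v (i - 1) [] rest := by
          simp only [aGo]
          rw [if_pos ⟨hpos, hvp⟩]
        rw [hstep, aGo_run rest (i + 1) v (i - 1) hpos (by omega)]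
        have hp : decide (v > 0) = true := by simp [hpos]
        rw [altGo_cons n i v rest, hp, runLen_cons_pos (p := true) (v := v) (rest := rest) hp]
        have hcast : ((runLen true rest + 1 : Nat) : Int) = (runLen true rest : Int) + 1 := by
          push_cast; ring
        rw [hcast]
        set l' := runLen true rest with hl'
        have hnlen : n = i + 1 + rest.length := by
          simp only [List.length_cons] at hn; push_cast at hn ⊢; omega
        by_cases h : l' < rest.length
        · rw [if_pos h]
          -- A-side tail: gap state after the falling element
          have hvp' : rest.getD l' 0 ≤ 0 := after_run_nonpos rest h
          have hdl : (List.drop (l' + 1) rest).length = rest.length - (l' + 1) :=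
            List.length_drop ..
          rw [ih (List.drop (l' + 1) rest) (by rw [hdl]; simp only [List.length_cons] at hlen; omega)
              (i + 1 + (l' : Int) + 1) (rest.getD l' 0) (i - 1) n hvp' (by omega)
              (by rw [hdl]; push_cast [Nat.cast_sub (by omega : l' + 1 ≤ rest.length)]; omega)]
          -- B-side tail: drop (l'+1) (v::rest) = drop l' rest starts with the falling element
          have hdrop : List.drop (l' + 1) (v :: rest) = List.drop l' rest := by simp
          rw [hdrop]
          obtain ⟨w, rest2, hw⟩ : ∃ w rest2, List.drop l' rest = w :: rest2 := by
            cases hd : List.drop l' rest with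
            | nil =>
              exfalso
              have := List.length_drop (i := l') (l := rest)
              rw [hd] at this; simp at this; omega
            | cons w rest2 => exact ⟨w, rest2, rfl⟩
          have hw0 : w ≤ 0 := by
            have hgd : rest.getD l' 0 = w := by
              rw [List.getD_eq_getElem?_getD, ← List.head?_drop, hw]; rfl
            omega
          have hrest2 : rest2 = List.drop (l' + 1) rest := by
            have hdd : List.drop 1 (List.drop l' rest) = List.drop (l' + 1) rest := by
              rw [List.drop_drop]
            rw [← hdd, hw]; rfl
          rw [hw, altGo_nonpos_step n (i + ((l' : Int) + 1)) w rest2 hw0, hrest2]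
          have e1 : i + ((l' : Int) + 1) + 1 = i + 1 + (l' : Int) + 1 := by ring
          rw [e1]
          -- emissions: A's (i+1+l') - (i-1) > 2 iff B's l'+1 ≥ 2 (given l' < rest.length)
          congr 1
          by_cases hc2 : i + 1 + (l' : Int) - (i - 1) > 2
          · rw [if_pos hc2, if_pos (show (true = true) ∧
                i + ((l' : Int) + 1) < n ∧ 2 ≤ l' + 1 from ⟨rfl, by omega, by omega⟩)]
          · rw [if_neg hc2, if_neg (by rintro ⟨-, -, h2⟩; omega)]
        · -- run reaches the end of the list: A emits nothing, B's i+l < n guard fails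
          rw [if_neg h]
          have hle : l' = rest.length := le_antisymm (runLen_le true rest) (by omega)
          rw [if_neg (by rintro ⟨-, h1, -⟩; omega)]
          have hde : List.drop (l' + 1) (v :: rest) = [] :=
            List.drop_eq_nil_of_le (by simp only [List.length_cons]; omega)
          rw [hde, altGo]
          simp
      · -- v ≤ 0: stay in gap state
        have hstep : aGo i valp pos1 [] (v :: rest) = aGo (i + 1) v pos1 [] rest := by
          simp only [aGo]
          rw [if_neg (by rintro ⟨h, -⟩; omega), if_neg (by rintro ⟨-, -, h⟩; omega)]
        rw [hstep, ih rest (by simp only [List.length_cons] at hlen; omega)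
            (i + 1) v pos1 n (by omega) (by omega)
            (by simp only [List.length_cons] at hn; push_cast at hn ⊢; omega)]
        exact (altGo_nonpos_step n i v rest (by omega)).symm

-- ===== VERDICT (by name: the statement is the Claim_ definition above) =====
theorem bounding_vertical_rect_spec : Claim_equal_bounding_vertical_rect := by
  intro xs _
  unfold Spec_bounding_vertical_rect bounding_vertical_rect bounding_vertical_rect_alt
  exact aGo_gap xs.length xs le_rfl 0 0 0 (xs.length : Int) le_rfl le_rfl (by simp)
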